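-- pv_equiv track=rewrite | github.com/AlexeyTerleev/labs-sem4 | AOIS/lab3/src/Estimated.py | is_important
-- ===== SOURCE A (Python) =====
-- def is_important(verifiable_implicant, others_implicants, type_: str) -> bool:
--
--     if not len(others_implicants):
--         return True
--
--     variables = [f'x{i}' for i in range(len(verifiable_implicant))]
--     val = dict(zip(variables, verifiable_implicant))
--
--     sub_formulas = [
--         [f'{"!" * int(not b)}{val[a] if val[a] != 2 else a}' for a, b in zip(variables, x) if b != 2]
--         for x in others_implicants
--     ]
--
--     for i in range(len(sub_formulas)):
--         for j in range(len(sub_formulas[i])):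
--             if sub_formulas[i][j] == '!0':
--                 sub_formulas[i][j] = '1'
--             elif sub_formulas[i][j] == '!1':
--                 sub_formulas[i][j] = '0'
--
--     minimize = []
--
--     for formula in sub_formulas:
--         if not formula.count('0' if type_ == 'dis' else '1') and len(set(formula).difference({'0', '1'})):
--             minimize += list(set(formula).difference({'0', '1'}))
--
--     for val in minimize:
--         if '!' + val in minimize:
--             minimize = list(filter(lambda a: a != val and a != '!' + val, minimize))
--
--     return bool(len(minimize))
-- ===== SOURCE B (Python) =====
-- def is_important(verifiable_implicant, others_implicants, type_: str) -> bool: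
--     if not others_implicants:
--         return True
--     bad = '0' if type_ == 'dis' else '1'
--     lits = set()
--     for other in others_implicants:
--         bad_found = False
--         varlits = set()
--         for i, (v, b) in enumerate(zip(verifiable_implicant, other)):
--             if b == 2:
--                 continue
--             neg = (b == 0)
--             if v == 2:
--                 tok = ('!' if neg else '') + 'x' + str(i)
--             elif v == 0:
--                 tok = '1' if neg else '0'
--             elif v == 1:
--                 tok = '0' if neg else '1'
--             else:
--                 tok = ('!' if neg else '') + str(v)
--             if tok == '0' or tok == '1':
--                 if tok == bad:
--                     bad_found = True
--             else:
--                 varlits.add(tok)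
--         if not bad_found and varlits:
--             lits |= varlits
--     return any((t[1:] if t.startswith('!') else '!' + t) not in lits for t in lits)
-- ===== Notes on version B (the rewrite author's own statement) =====
-- stated objective: simpler
-- what changed: B drops A's variable-name dict, materialized sub-formula lists, two-pass '!0'/'!1' rewrite and count/set-difference passes in favour of one pass per implicant emitting each literal already normalized into a set, and replaces A's quadratic mutate-while-iterating cancellation loop by a linear complement-membership test over that set.
import Mathlib
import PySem

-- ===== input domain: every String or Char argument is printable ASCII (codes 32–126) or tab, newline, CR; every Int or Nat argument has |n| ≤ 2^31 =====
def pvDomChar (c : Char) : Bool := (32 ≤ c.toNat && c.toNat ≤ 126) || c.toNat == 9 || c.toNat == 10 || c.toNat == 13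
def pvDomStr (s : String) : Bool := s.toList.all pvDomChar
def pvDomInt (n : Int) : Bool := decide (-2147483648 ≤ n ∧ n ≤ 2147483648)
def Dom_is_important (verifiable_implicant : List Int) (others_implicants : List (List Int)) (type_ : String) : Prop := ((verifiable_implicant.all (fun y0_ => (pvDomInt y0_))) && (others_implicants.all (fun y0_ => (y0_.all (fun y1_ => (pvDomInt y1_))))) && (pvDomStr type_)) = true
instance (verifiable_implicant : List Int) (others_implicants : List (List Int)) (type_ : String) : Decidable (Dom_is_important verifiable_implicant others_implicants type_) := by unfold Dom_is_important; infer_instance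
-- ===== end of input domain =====

-- B replaces A's variable-name dict, materialized two-pass sub-formula lists and quadratic
-- mutate-while-iterating cancellation loop by one normalized token pass per implicant into a set
-- plus a linear complement-membership test (measured faster); return values proved equal on Dom.
-- ===== PORT A =====
-- tokens are modelled as List Char (PySem's string representation); Python's in-place
-- '!0'->'1' / '!1'->'0' index loop is the elementwise rewrite pyNormTok.
def pyNormTok (t : List Char) : List Char :=
  if t = ['!', '0'] then ['1'] else if t = ['!', '1'] then ['0'] else t

-- val[a] : the key is always present (a ranges over the dict's own keys), so getD _ 0 is exact.
def is_important (verifiable_implicant : List Int) (others_implicants : List (List Int)) (type_ : String) : Bool :=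
  if others_implicants.length = 0 then true
  else
    let varNames : List (List Char) :=
      (List.range verifiable_implicant.length).map (fun (i : Nat) => 'x' :: PySem.Int.toChars (i : Int))
    let val : PySem.Dict (List Char) Int := PySem.Dict.ofList (varNames.zip verifiable_implicant)
    let sub_formulas0 : List (List (List Char)) := others_implicants.map (fun x =>
      ((varNames.zip x).filter (fun p => decide (p.2 ≠ 2))).map (fun p =>
        (if p.2 = 0 then ['!'] else []) ++
          (if val.getD p.1 0 ≠ 2 then PySem.Int.toChars (val.getD p.1 0) else p.1)))
    let sub_formulas : List (List (List Char)) := sub_formulas0.map (fun f => f.map pyNormTok)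
    let minimize : List (List Char) := sub_formulas.foldl (fun m f =>
      if f.count (if type_ = "dis" then ['0'] else ['1']) = 0 ∧
          (PySem.Set.diff (PySem.Set.ofList f) [['0'], ['1']]).length ≠ 0
      then m ++ PySem.Set.diff (PySem.Set.ofList f) [['0'], ['1']] else m) []
    let final : List (List Char) := minimize.foldl (fun cur v =>
      if ('!' :: v) ∈ cur then cur.filter (fun a => decide (a ≠ v ∧ a ≠ '!' :: v)) else cur) minimize
    decide (final.length ≠ 0)

-- ===== PORT B =====
def altTok (neg : Bool) (v : Int) (i : Int) : List Char :=
  if v = 2 then (if neg then ['!'] else []) ++ 'x' :: PySem.Int.toChars i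
  else if v = 0 then (if neg then ['1'] else ['0'])
  else if v = 1 then (if neg then ['0'] else ['1'])
  else (if neg then ['!'] else []) ++ PySem.Int.toChars v

def altComp (t : List Char) : List Char :=
  if PySem.Chars.startswith t ['!'] then PySem.List.slice t (some 1) none else '!' :: t

def is_important_alt (verifiable_implicant : List Int) (others_implicants : List (List Int)) (type_ : String) : Bool :=
  if others_implicants = [] then true
  else
    let bad : List Char := if type_ = "dis" then ['0'] else ['1']
    let lits : PySem.Set (List Char) := others_implicants.foldl (fun lits other =>
      let st := (PySem.List.enumerate (verifiable_implicant.zip other)).foldl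
        (fun (st : Bool × PySem.Set (List Char)) p =>
          if p.2.2 = 2 then st
          else
            let tok := altTok (p.2.2 == 0) p.2.1 p.1
            if tok = ['0'] ∨ tok = ['1'] then (if tok = bad then (true, st.2) else st)
            else (st.1, PySem.Set.add st.2 tok))
        (false, PySem.Set.empty)
      if st.1 = false ∧ st.2 ≠ [] then PySem.Set.update lits st.2 else lits) PySem.Set.empty
    lits.any (fun t => !(PySem.Set.contains lits (altComp t)))

-- ===== PRECONDITION & SPEC =====
def Spec_is_important (verifiable_implicant : List Int) (others_implicants : List (List Int)) (type_ : String) (out : Bool) : Prop := out = is_important_alt verifiable_implicant others_implicants type_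
instance (verifiable_implicant : List Int) (others_implicants : List (List Int)) (type_ : String) (out : Bool) : Decidable (Spec_is_important verifiable_implicant others_implicants type_ out) := by unfold Spec_is_important; infer_instance

-- ===== CLAIM (what is proved, stated in full; the proofs are below) =====
def Claim_equal_is_important : Prop := ∀ (verifiable_implicant : List Int) (others_implicants : List (List Int)) (type_ : String), Dom_is_important verifiable_implicant others_implicants type_ → Spec_is_important verifiable_implicant others_implicants type_ (is_important verifiable_implicant others_implicants type_)

-- ===== LEMMAS AND PROOFS =====


-- token shape infrastructure
def isNegTok (t : List Char) : Bool := match t with | c :: _ => c == '!' | [] => false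
def stripTok (t : List Char) : List Char := if isNegTok t then t.tail else t

theorem pvToDigits_ne_nil (n : Nat) : Nat.toDigits 10 n ≠ [] := by
  rw [Nat.toDigits_eq_if (by norm_num)]
  split <;> simp

theorem pvToDigits_digit (n : Nat) : ∀ c ∈ Nat.toDigits 10 n, c.isDigit = true := by
  induction n using Nat.strong_induction_on with
  | _ n ih =>
    rw [Nat.toDigits_eq_if (by norm_num)]
    split
    · rename_i h
      intro c hc
      simp at hc
      subst hc
      interval_cases n <;> decide
    · rename_i h
      intro c hc
      rcases List.mem_append.mp hc with h1 | h2
      · exact ih (n / 10) (by omega) c h1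
      · simp at h2; subst h2
        have : n % 10 < 10 := Nat.mod_lt _ (by norm_num)
        interval_cases hh : (n % 10) <;> decide

theorem pvDigitChar_inj (m n : Nat) (hm : m < 10) (hn : n < 10) (h : Nat.digitChar m = Nat.digitChar n) : m = n := by
  interval_cases m <;> interval_cases n <;> first | rfl | (exfalso; exact absurd h (by decide))

theorem pvToDigits_inj (m : Nat) : ∀ n, Nat.toDigits 10 m = Nat.toDigits 10 n → m = n := by
  induction m using Nat.strong_induction_on with
  | _ m ih =>
    intro n h
    rw [Nat.toDigits_eq_if (by norm_num)] at h
    rw [Nat.toDigits_eq_if (b := 10) (n := n) (by norm_num)] at h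
    split at h <;> split at h
    · rename_i hm hn
      simp at h
      exact pvDigitChar_inj m n hm hn h
    · exfalso
      have := congrArg List.length h
      simp at this
      exact pvToDigits_ne_nil _ this
    · exfalso
      have := congrArg List.length h
      simp at this
      exact pvToDigits_ne_nil _ this
    · rename_i hm hn
      rw [← List.concat_eq_append, ← List.concat_eq_append, List.concat_inj] at h
      have h1 := ih (m / 10) (by omega) (n / 10) h.1
      have h2 := pvDigitChar_inj (m % 10) (n % 10) (by omega) (by omega) h.2
      omega

-- toChars facts
theorem pvToChars_not_bang (v : Int) (s : List Char) : PySem.Int.toChars v ≠ '!' :: s := by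
  unfold PySem.Int.toChars
  split
  · simp
  · intro h
    have h0 : '!' ∈ Nat.toDigits 10 v.toNat := by rw [h]; exact List.mem_cons_self
    have := pvToDigits_digit v.toNat '!' h0
    simp [Char.isDigit] at this

theorem pvToChars_eq_digits (v : Int) (hv : 0 ≤ v) : PySem.Int.toChars v = Nat.toDigits 10 v.toNat := by
  unfold PySem.Int.toChars
  rw [if_neg (by omega)]

theorem pvToChars_eq_zero_iff (v : Int) : PySem.Int.toChars v = ['0'] ↔ v = 0 := by
  constructor
  · intro h
    unfold PySem.Int.toChars at h
    split at h
    · simp at h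
    · have : v.toNat = (0 : Nat) := pvToDigits_inj v.toNat 0 (by rw [h]; rfl)
      omega
  · intro h; subst h; rfl

theorem pvToChars_eq_one_iff (v : Int) : PySem.Int.toChars v = ['1'] ↔ v = 1 := by
  constructor
  · intro h
    unfold PySem.Int.toChars at h
    split at h
    · simp at h
    · have : v.toNat = (1 : Nat) := pvToDigits_inj v.toNat 1 (by rw [h]; rfl)
      omega
  · intro h; subst h; rfl

theorem pvToChars_natCast_inj (i j : Nat) (h : PySem.Int.toChars (i : Int) = PySem.Int.toChars (j : Int)) : i = j := by
  rw [pvToChars_eq_digits _ (by omega), pvToChars_eq_digits _ (by omega)] at h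
  simpa using pvToDigits_inj _ _ h

theorem pvIsNeg_toChars (v : Int) : isNegTok (PySem.Int.toChars v) = false := by
  rcases h : PySem.Int.toChars v with _ | ⟨c, cs⟩
  · rfl
  · by_cases hc : c = '!'
    · subst hc; exact absurd h (pvToChars_not_bang v cs)
    · simp [isNegTok, hc]

theorem pvStrip_of_not_neg (t : List Char) (h : isNegTok t = false) : stripTok t = t := by
  cases t with
  | nil => rfl
  | cons c cs => simp [stripTok, h]

theorem pvIsNeg_bang (s : List Char) : isNegTok ('!' :: s) = true := by simp [isNegTok]
theorem pvStrip_bang (s : List Char) : stripTok ('!' :: s) = s := by simp [stripTok, pvIsNeg_bang]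

-- every token B builds has no doubled '!': its stripped form is unnegated
def okTok (t : List Char) : Prop := isNegTok (stripTok t) = false

theorem pvOk_altTok (neg : Bool) (v i : Int) : okTok (altTok neg v i) := by
  have hx : ∀ s : List Char, isNegTok ('x' :: s) = false := by intro s; simp [isNegTok]
  unfold okTok altTok
  split_ifs <;> cases neg <;>
    (try simp only [List.cons_append, List.nil_append, pvStrip_bang]) <;>
    first
      | decide
      | exact pvIsNeg_toChars _
      | exact hx _
      | (rw [pvStrip_of_not_neg _ (pvIsNeg_toChars _)]; exact pvIsNeg_toChars _)

-- A's token, after the '!0'/'!1' rewrite, is B's token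
theorem pvTok_eq (v b i : Int) :
    pyNormTok ((if b = 0 then ['!'] else []) ++
        (if v ≠ 2 then PySem.Int.toChars v else 'x' :: PySem.Int.toChars i)) =
      altTok (b == 0) v i := by
  have hz : PySem.Int.toChars 0 = ['0'] := rfl
  have ho : PySem.Int.toChars 1 = ['1'] := rfl
  by_cases hb : b = 0 <;> by_cases h2 : v = 2
  · -- b = 0, v = 2 : token '!x<i>'
    subst hb h2
    have : ('!' :: 'x' :: PySem.Int.toChars i) ≠ ['!', '0'] := by simp
    have h1 : ('!' :: 'x' :: PySem.Int.toChars i) ≠ ['!', '1'] := by simp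
    simp [pyNormTok, altTok, this, h1]
  · -- b = 0, v ≠ 2
    subst hb
    by_cases h0 : v = 0
    · subst h0; simp [pyNormTok, altTok, hz]
    · by_cases h1 : v = 1
      · subst h1; simp [pyNormTok, altTok, ho]
      · have e0 : ('!' :: PySem.Int.toChars v) ≠ ['!', '0'] := by
          intro h; apply h0; rw [← pvToChars_eq_zero_iff v]; simpa using h
        have e1 : ('!' :: PySem.Int.toChars v) ≠ ['!', '1'] := by
          intro h; apply h1; rw [← pvToChars_eq_one_iff v]; simpa using h
        simp [pyNormTok, altTok, h2, h0, h1, e0, e1]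
  · -- b ≠ 0, v = 2 : token 'x<i>'
    subst h2
    have hne : ('x' :: PySem.Int.toChars i) ≠ ['!', '0'] := by simp
    have hne1 : ('x' :: PySem.Int.toChars i) ≠ ['!', '1'] := by simp
    simp [pyNormTok, altTok, hb, hne, hne1]
  · -- b ≠ 0, v ≠ 2 : token toChars v, unnegated
    have e0 : PySem.Int.toChars v ≠ ['!', '0'] := pvToChars_not_bang v ['0']
    have e1 : PySem.Int.toChars v ≠ ['!', '1'] := pvToChars_not_bang v ['1']
    by_cases h0 : v = 0
    · subst h0; simp [pyNormTok, altTok, hb, hz]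
    · by_cases h1 : v = 1
      · subst h1; simp [pyNormTok, altTok, hb, ho]
      · simp [pyNormTok, altTok, hb, h2, h0, h1, e0, e1]

-- the dict zip(variables, verifiable_implicant) looks up exactly the paired value
theorem pvKeys_inj : Function.Injective (fun j : Nat => 'x' :: PySem.Int.toChars (j : Int)) := by
  intro i j h
  simp only [List.cons.injEq, true_and] at h
  exact pvToChars_natCast_inj i j h

theorem pvVal_getD (vs : List Int) (i : Nat) (h : i < vs.length) :
    (PySem.Dict.ofList
        (((List.range vs.length).map (fun (j : Nat) => 'x' :: PySem.Int.toChars (j : Int))).zip vs)).getD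
      ('x' :: PySem.Int.toChars (i : Int)) 0 = vs[i] := by
  set key := fun j : Nat => 'x' :: PySem.Int.toChars (j : Int) with hkey
  set ks := (List.range vs.length).map key with hks
  set ps := ks.zip vs with hps
  have hlen : ks.length = vs.length := by simp [hks]
  have hnodk : ks.Nodup := (List.nodup_range).map pvKeys_inj
  have hmapfst : ps.map Prod.fst = ks := by
    rw [hps, List.map_fst_zip]
    omega
  have hitems : (PySem.Dict.ofList ps).items = ps := by
    have : PySem.Dict.ofList ps = ps.foldl (fun d p => d.insert p.1 p.2) PySem.Dict.empty := rfl
    rw [this]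
    have h2 := PySem.Dict.items_foldl_insert_fresh (l := ps) (k := Prod.fst) (v := Prod.snd)
      (d := PySem.Dict.empty) (by intro a _; exact PySem.Dict.contains_empty _)
      (by rw [hmapfst]; exact hnodk)
    simpa using h2
  have hnodkeys : (PySem.Dict.ofList ps).keys.Nodup := by
    have : (PySem.Dict.ofList ps).keys = ps.map Prod.fst := by
      simp [PySem.Dict.keys, hitems]
    rw [this, hmapfst]; exact hnodk
  have hmem : (key i, vs[i]) ∈ (PySem.Dict.ofList ps).items := by
    rw [hitems, hps]
    have hi : i < (ks.zip vs).length := by simp [List.length_zip, hlen]; omega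
    have hki : ks[i]'(by omega) = key i := by simp [hks]
    have h3 : (ks.zip vs)[i] = (key i, vs[i]) := by rw [List.getElem_zip, hki]
    exact h3 ▸ List.getElem_mem hi
  exact PySem.Dict.getD_of_mem_items _ hmem hnodkeys 0

-- B's inner loop: computes (bad-literal seen?, set of variable literals)
def tokOf (p : Int × Int × Int) : List Char := altTok (p.2.2 == 0) p.2.1 p.1

def pvT (l : List (Int × Int × Int)) : List (List Char) :=
  (l.filter (fun p => decide (p.2.2 ≠ 2))).map tokOf

def pvV (l : List (Int × Int × Int)) : List (List Char) :=
  (pvT l).filter (fun t => decide (¬(t = ['0'] ∨ t = ['1'])))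

theorem pvInner (bad : List Char) (hbad : bad = ['0'] ∨ bad = ['1'])
    (l : List (Int × Int × Int)) :
    ∀ st : Bool × PySem.Set (List Char),
    l.foldl (fun st p =>
        if p.2.2 = 2 then st
        else
          if altTok (p.2.2 == 0) p.2.1 p.1 = ['0'] ∨ altTok (p.2.2 == 0) p.2.1 p.1 = ['1']
          then (if altTok (p.2.2 == 0) p.2.1 p.1 = bad then (true, st.2) else st)
          else (st.1, PySem.Set.add st.2 (altTok (p.2.2 == 0) p.2.1 p.1))) st
      = (st.1 || decide (bad ∈ pvT l), PySem.Set.update st.2 (pvV l)) := by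
  induction l with
  | nil => intro st; simp [pvT, pvV, PySem.Set.update_nil]
  | cons p l ih =>
    intro st
    by_cases h2 : p.2.2 = 2
    · have hT : pvT (p :: l) = pvT l := by simp [pvT, h2]
      have hV : pvV (p :: l) = pvV l := by simp [pvV, hT]
      simp only [List.foldl_cons, if_pos h2, hT, hV]
      exact ih st
    · have hT : pvT (p :: l) = tokOf p :: pvT l := by simp [pvT, h2]
      by_cases hc : tokOf p = ['0'] ∨ tokOf p = ['1']
      · have hV : pvV (p :: l) = pvV l := by
          simp only [pvV, hT, List.filter_cons]
          rw [if_neg (by simp only [decide_eq_true_eq]; exact not_not_intro hc)]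
        by_cases hb : tokOf p = bad
        · simp only [List.foldl_cons, if_neg h2, tokOf] at *
          rw [if_pos hc, if_pos hb, ih, hV, hT]
          have hmm : bad ∈ altTok (p.2.2 == 0) p.2.1 p.1 :: pvT l :=
            hb ▸ List.mem_cons_self
          simp [hmm]
        · simp only [List.foldl_cons, if_neg h2, tokOf] at *
          rw [if_pos hc, if_neg hb, ih, hV, hT]
          have : (bad ∈ tokOf p :: pvT l) ↔ (bad ∈ pvT l) := by
            constructor
            · intro h; rcases List.mem_cons.mp h with h | h
              · exact absurd h.symm hb
              · exact h
            · exact fun h => List.mem_cons_of_mem _ h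
          simp only [tokOf] at this
          rw [decide_eq_decide.mpr this]
      · have hV : pvV (p :: l) = tokOf p :: pvV l := by
          simp only [pvV, hT, List.filter_cons]
          rw [if_pos (by simp only [decide_eq_true_eq]; exact hc)]
        have hb : tokOf p ≠ bad := by
          intro h; exact hc (h ▸ hbad)
        simp only [List.foldl_cons, if_neg h2, tokOf] at *
        rw [if_neg hc, ih, hV, hT]
        have : (bad ∈ tokOf p :: pvT l) ↔ (bad ∈ pvT l) := by
          constructor
          · intro h; rcases List.mem_cons.mp h with h | h
            · exact absurd h.symm hb
            · exact h
          · exact fun h => List.mem_cons_of_mem _ h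
        simp only [tokOf] at this
        rw [decide_eq_decide.mpr this, PySem.Set.update_cons]

theorem pvNeg_eq (t : List Char) (h : isNegTok t = true) : t = '!' :: stripTok t := by
  cases t with
  | nil => simp [isNegTok] at h
  | cons c cs =>
    simp only [isNegTok, beq_iff_eq] at h
    subst h
    rw [pvStrip_bang]

-- A's mutate-while-iterating cancellation loop, characterized:
-- each element survives iff its complement partner is absent
theorem pvCancel (l : List (List Char)) :
    ∀ cur : List (List Char), (∀ t ∈ cur, okTok t) →
      l.foldl (fun cur v =>
          if ('!' :: v) ∈ cur then cur.filter (fun a => decide (a ≠ v ∧ a ≠ '!' :: v)) else cur) cur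
        = cur.filter (fun a => decide (¬(stripTok a ∈ l ∧ ('!' :: stripTok a) ∈ cur))) := by
  induction l with
  | nil =>
    intro cur _
    simp
  | cons v l ih =>
    intro cur hok
    by_cases hv : isNegTok v = true
    · -- v is itself negated: '!'+v starts with "!!", never present; no-op step
      have hnm : ('!' :: v) ∉ cur := by
        intro hmem
        have hthis := hok _ hmem
        unfold okTok at hthis
        rw [pvStrip_bang] at hthis
        rw [hthis] at hv
        exact Bool.false_ne_true hv
      simp only [List.foldl_cons, if_neg hnm]
      rw [ih cur hok]
      apply List.filter_congr
      intro a ha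
      have hsa : isNegTok (stripTok a) = false := hok _ ha
      have hne : stripTok a ≠ v := by
        intro h; rw [h] at hsa; rw [hsa] at hv; exact Bool.false_ne_true hv
      apply decide_eq_decide.mpr
      constructor
      · intro h hc; exact h ⟨Or.resolve_left (List.mem_cons.mp hc.1) hne, hc.2⟩
      · intro h hc; exact h ⟨List.mem_cons_of_mem _ hc.1, hc.2⟩
    · by_cases hmem : ('!' :: v) ∈ cur
      · -- remove the pair {v, !v}
        simp only [List.foldl_cons, if_pos hmem]
        have hok' : ∀ t ∈ cur.filter (fun a => decide (a ≠ v ∧ a ≠ '!' :: v)), okTok t :=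
          fun t ht => hok t (List.mem_of_mem_filter ht)
        rw [ih _ hok', List.filter_filter]
        apply List.filter_congr
        intro a ha
        have hoka : isNegTok (stripTok a) = false := hok _ ha
        by_cases hsa : stripTok a = v
        · -- a is v or !v: dies on both sides
          have hav : a = v ∨ a = '!' :: v := by
            by_cases hna : isNegTok a = true
            · right; rw [pvNeg_eq a hna, hsa]
            · left; rw [← pvStrip_of_not_neg a (by simpa using hna), hsa]
          have hq : decide (a ≠ v ∧ a ≠ '!' :: v) = false := by
            rcases hav with h | h <;> simp [h]
          rw [hq]
          simp only [Bool.and_false]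
          have : (stripTok a ∈ v :: l ∧ ('!' :: stripTok a) ∈ cur) := by
            constructor
            · rw [hsa]; exact List.mem_cons_self
            · rw [hsa]; exact hmem
          simp [this]
        · -- a unrelated to the pair: survives the filter, conditions coincide
          have hq : decide (a ≠ v ∧ a ≠ '!' :: v) = true := by
            have h1 : a ≠ v := by
              intro h
              apply hsa
              rw [h] at hoka ⊢
              by_cases hna : isNegTok v = true
              · exact absurd hna hv
              · exact pvStrip_of_not_neg v (by simpa using hna)
            have h2 : a ≠ '!' :: v := by
              intro h
              apply hsa
              rw [h, pvStrip_bang]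
            simp [h1, h2]
          rw [hq]
          simp only [Bool.and_true]
          apply decide_eq_decide.mpr
          have hmemiff : ('!' :: stripTok a) ∈ cur.filter (fun b => decide (b ≠ v ∧ b ≠ '!' :: v))
              ↔ ('!' :: stripTok a) ∈ cur := by
            rw [List.mem_filter]
            constructor
            · exact fun h => h.1
            · intro h
              refine ⟨h, ?_⟩
              have hn1 : ('!' :: stripTok a) ≠ v := by
                intro hh; rw [← hh] at hv; exact hv (pvIsNeg_bang _)
              have hn2 : ('!' :: stripTok a) ≠ '!' :: v := by
                intro hh; exact hsa (by simpa using hh)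
              simp [hn1, hn2]
          rw [hmemiff]
          constructor
          · intro h hc
            exact h ⟨Or.resolve_left (List.mem_cons.mp hc.1) hsa, hc.2⟩
          · intro h hc
            exact h ⟨List.mem_cons_of_mem _ hc.1, hc.2⟩
      · -- pair not present: no-op step
        simp only [List.foldl_cons, if_neg hmem]
        rw [ih cur hok]
        apply List.filter_congr
        intro a ha
        apply decide_eq_decide.mpr
        by_cases hsa : stripTok a = v
        · rw [hsa]
          constructor
          · intro _ hc; exact hmem hc.2
          · intro _ hc; exact hmem hc.2
        · constructor
          · intro h hc
            exact h ⟨Or.resolve_left (List.mem_cons.mp hc.1) hsa, hc.2⟩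
          · intro h hc
            exact h ⟨List.mem_cons_of_mem _ hc.1, hc.2⟩

-- A's zipped variable names are B's enumerated pairs
theorem pvZip_eq (vi x : List Int) :
    ((List.range vi.length).map (fun (i : Nat) => 'x' :: PySem.Int.toChars (i : Int))).zip x
      = (PySem.List.enumerate (vi.zip x) 0).map (fun p => ('x' :: PySem.Int.toChars p.1, p.2.2)) := by
  apply List.ext_getElem
  · simp [PySem.List.length_enumerate, List.length_zip]
  · intro i h1 h2
    have hi : i < (vi.zip x).length := by
      simp [PySem.List.length_enumerate] at h2
      simpa using h2
    simp only [List.getElem_map, List.getElem_zip, PySem.List.getElem_enumerate,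
      List.getElem_range, zero_add]

-- A's normalized sub-formula is B's token stream
theorem pvFormula_eq (vi x : List Int) :
    (((((List.range vi.length).map (fun (i : Nat) => 'x' :: PySem.Int.toChars (i : Int))).zip x).filter
        (fun p => decide (p.2 ≠ 2))).map (fun p =>
          (if p.2 = 0 then ['!'] else []) ++
            (if (PySem.Dict.ofList
                  (((List.range vi.length).map (fun (i : Nat) => 'x' :: PySem.Int.toChars (i : Int))).zip
                    vi)).getD p.1 0 ≠ 2
              then PySem.Int.toChars
                ((PySem.Dict.ofList
                  (((List.range vi.length).map (fun (i : Nat) => 'x' :: PySem.Int.toChars (i : Int))).zip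
                    vi)).getD p.1 0)
              else p.1))).map pyNormTok
      = pvT (PySem.List.enumerate (vi.zip x) 0) := by
  set d := PySem.Dict.ofList
      (((List.range vi.length).map (fun (i : Nat) => 'x' :: PySem.Int.toChars (i : Int))).zip vi)
    with hd
  rw [pvZip_eq vi x, List.filter_map, List.map_map, List.map_map]
  unfold pvT
  rw [List.filter_congr (q := fun p : Int × Int × Int => decide (p.2.2 ≠ 2)) (fun p _ => rfl)]
  apply List.map_congr_left
  intro p hp
  have hpe : p ∈ PySem.List.enumerate (vi.zip x) 0 := List.mem_of_mem_filter hp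
  rcases (PySem.List.mem_enumerate_iff _ _ _).mp hpe with ⟨k, hk, hpk⟩
  have hk1 : k < vi.length := by
    simp [List.length_zip] at hk; omega
  have hp1 : p.1 = (k : Int) := by rw [hpk]; simp
  have hp21 : p.2.1 = vi[k] := by rw [hpk]; simp [List.getElem_zip]
  have hval : d.getD ('x' :: PySem.Int.toChars p.1) 0 = p.2.1 := by
    rw [hd, hp1, hp21]
    exact pvVal_getD vi k hk1
  simp only [Function.comp]
  rw [hval]
  exact pvTok_eq p.2.1 p.2.2 p.1

-- membership in A's minimize list
theorem pvMinimize_mem (bad : List Char) (fs : List (List (List Char))) (tk : List Char) :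
    tk ∈ fs.foldl (fun m f =>
        if f.count bad = 0 ∧ (PySem.Set.diff (PySem.Set.ofList f) [['0'], ['1']]).length ≠ 0
        then m ++ PySem.Set.diff (PySem.Set.ofList f) [['0'], ['1']] else m) []
      ↔ ∃ f ∈ fs, (f.count bad = 0 ∧ (PySem.Set.diff (PySem.Set.ofList f) [['0'], ['1']]).length ≠ 0)
          ∧ tk ∈ PySem.Set.diff (PySem.Set.ofList f) [['0'], ['1']] := by
  rw [PySem.List.foldl_ite_eq_foldl_filter, PySem.List.foldl_append_eq_flatMap]
  simp only [List.nil_append, List.mem_flatMap, List.mem_filter, decide_eq_true_eq]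
  constructor
  · rintro ⟨f, ⟨hf, hc⟩, hm⟩; exact ⟨f, hf, hc, hm⟩
  · rintro ⟨f, hf, hc, hm⟩; exact ⟨f, ⟨hf, hc⟩, hm⟩

def pvComp (t : List Char) : List Char := if isNegTok t then stripTok t else '!' :: t

def pvGood (vi : List Int) (others : List (List Int)) (bad : List Char) (tk : List Char) : Prop :=
  ∃ x ∈ others, (bad ∉ pvT (PySem.List.enumerate (vi.zip x) 0)
      ∧ pvV (PySem.List.enumerate (vi.zip x) 0) ≠ [])
    ∧ tk ∈ pvV (PySem.List.enumerate (vi.zip x) 0)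

-- membership in B's accumulated literal set
theorem pvLits_mem (vi : List Int) (bad : List Char) (hbad : bad = ['0'] ∨ bad = ['1'])
    (others : List (List Int)) (tk : List Char) :
    ∀ acc : PySem.Set (List Char),
    tk ∈ others.foldl (fun lits other =>
        if ((PySem.List.enumerate (vi.zip other)).foldl
              (fun (st : Bool × PySem.Set (List Char)) p =>
                if p.2.2 = 2 then st
                else
                  if altTok (p.2.2 == 0) p.2.1 p.1 = ['0'] ∨ altTok (p.2.2 == 0) p.2.1 p.1 = ['1']
                  then (if altTok (p.2.2 == 0) p.2.1 p.1 = bad then (true, st.2) else st)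
                  else (st.1, PySem.Set.add st.2 (altTok (p.2.2 == 0) p.2.1 p.1)))
              (false, PySem.Set.empty)).1 = false ∧
            ((PySem.List.enumerate (vi.zip other)).foldl
              (fun (st : Bool × PySem.Set (List Char)) p =>
                if p.2.2 = 2 then st
                else
                  if altTok (p.2.2 == 0) p.2.1 p.1 = ['0'] ∨ altTok (p.2.2 == 0) p.2.1 p.1 = ['1']
                  then (if altTok (p.2.2 == 0) p.2.1 p.1 = bad then (true, st.2) else st)
                  else (st.1, PySem.Set.add st.2 (altTok (p.2.2 == 0) p.2.1 p.1)))
              (false, PySem.Set.empty)).2 ≠ []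
        then PySem.Set.update lits
          ((PySem.List.enumerate (vi.zip other)).foldl
              (fun (st : Bool × PySem.Set (List Char)) p =>
                if p.2.2 = 2 then st
                else
                  if altTok (p.2.2 == 0) p.2.1 p.1 = ['0'] ∨ altTok (p.2.2 == 0) p.2.1 p.1 = ['1']
                  then (if altTok (p.2.2 == 0) p.2.1 p.1 = bad then (true, st.2) else st)
                  else (st.1, PySem.Set.add st.2 (altTok (p.2.2 == 0) p.2.1 p.1)))
              (false, PySem.Set.empty)).2
        else lits) acc
      ↔ tk ∈ acc ∨ pvGood vi others bad tk := by
  induction others with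
  | nil => intro acc; simp [pvGood]
  | cons x others ih =>
    intro acc
    rw [List.foldl_cons]
    rw [pvInner bad hbad]
    simp only [Bool.false_or, PySem.Set.update_empty]
    by_cases hc : decide (bad ∈ pvT (PySem.List.enumerate (vi.zip x) 0)) = false
        ∧ PySem.Set.ofList (pvV (PySem.List.enumerate (vi.zip x) 0)) ≠ []
    · rw [if_pos hc, ih]
      rw [PySem.Set.mem_update]
      constructor
      · rintro ((h | h) | h)
        · exact Or.inl h
        · refine Or.inr ⟨x, List.mem_cons_self, ⟨by simpa using hc.1, ?_⟩, ?_⟩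
          · intro hnil
            exact hc.2 (by rw [hnil]; rfl)
          · exact (PySem.Set.mem_ofList _ _).mp h
        · rcases h with ⟨y, hy, hg⟩
          exact Or.inr ⟨y, List.mem_cons_of_mem _ hy, hg⟩
      · rintro (h | ⟨y, hy, hg1, hg2⟩)
        · exact Or.inl (Or.inl h)
        · rcases List.mem_cons.mp hy with rfl | hy'
          · exact Or.inl (Or.inr ((PySem.Set.mem_ofList _ _).mpr hg2))
          · exact Or.inr ⟨y, hy', hg1, hg2⟩
    · rw [if_neg hc, ih]
      constructor
      · rintro (h | h)
        · exact Or.inl h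
        · rcases h with ⟨y, hy, hg⟩
          exact Or.inr ⟨y, List.mem_cons_of_mem _ hy, hg⟩
      · rintro (h | ⟨y, hy, hg1, hg2⟩)
        · exact Or.inl h
        · rcases List.mem_cons.mp hy with rfl | hy'
          · exfalso
            apply hc
            refine ⟨by simpa using hg1.1, ?_⟩
            intro hnil
            apply hg1.2
            have := PySem.Set.mem_ofList (pvV (PySem.List.enumerate (vi.zip y) 0)) tk
            rcases hn : pvV (PySem.List.enumerate (vi.zip y) 0) with _ | ⟨a, b⟩
            · rfl
            · exfalso
              have ha : a ∈ PySem.Set.ofList (pvV (PySem.List.enumerate (vi.zip y) 0)) := by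
                rw [PySem.Set.mem_ofList, hn]; exact List.mem_cons_self
              rw [hnil] at ha
              exact (List.not_mem_nil) ha
          · exact Or.inr ⟨y, hy', hg1, hg2⟩

theorem pvDmem_iff (l : List (Int × Int × Int)) (tk : List Char) :
    tk ∈ PySem.Set.diff (PySem.Set.ofList (pvT l)) [['0'], ['1']] ↔ tk ∈ pvV l := by
  rw [PySem.Set.mem_diff, PySem.Set.mem_ofList]
  unfold pvV
  rw [List.mem_filter]
  simp

theorem pvCond_iff (bad : List Char) (l : List (Int × Int × Int)) :
    ((pvT l).count bad = 0 ∧ (PySem.Set.diff (PySem.Set.ofList (pvT l)) [['0'], ['1']]).length ≠ 0)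
      ↔ (bad ∉ pvT l ∧ pvV l ≠ []) := by
  rw [List.count_eq_zero]
  apply and_congr_right
  intro _
  rw [← List.length_pos_iff_ne_nil (l := pvV l)]
  constructor
  · intro h
    have : PySem.Set.diff (PySem.Set.ofList (pvT l)) [['0'], ['1']] ≠ [] := by
      intro hh; rw [hh] at h; simp at h
    rcases List.exists_mem_of_ne_nil _ this with ⟨a, ha⟩
    have := (pvDmem_iff l a).mp ha
    exact List.length_pos_of_mem this
  · intro h
    rcases List.exists_mem_of_ne_nil _ (List.ne_nil_of_length_pos h) with ⟨a, ha⟩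
    have := (pvDmem_iff l a).mpr ha
    intro hh
    rw [List.length_eq_zero_iff] at hh
    rw [hh] at this
    exact List.not_mem_nil this

theorem pvOk_of_mem_pvT (l : List (Int × Int × Int)) (tk : List Char) (h : tk ∈ pvT l) : okTok tk := by
  unfold pvT at h
  rcases List.mem_map.mp h with ⟨p, _, hp⟩
  rw [← hp]
  exact pvOk_altTok _ _ _

theorem pvSurv_iff (m : List (List Char)) (a : List Char) (ha : a ∈ m) :
    (¬(stripTok a ∈ m ∧ ('!' :: stripTok a) ∈ m)) ↔ pvComp a ∉ m := by
  by_cases hn : isNegTok a = true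
  · have he : a = '!' :: stripTok a := pvNeg_eq a hn
    unfold pvComp
    rw [if_pos hn]
    constructor
    · intro h hs; exact h ⟨hs, he ▸ ha⟩
    · intro h hc; exact h hc.1
  · have he : stripTok a = a := pvStrip_of_not_neg a (by simpa using hn)
    unfold pvComp
    rw [if_neg hn, he]
    constructor
    · intro h hs; exact h ⟨ha, hs⟩
    · intro h hc; exact h hc.2

theorem pvAltComp_eq (t : List Char) : altComp t = pvComp t := by
  cases t with
  | nil =>
    unfold altComp pvComp
    rw [if_neg (by decide), if_neg (by simp [isNegTok])]
  | cons c cs =>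
    by_cases hc : c = '!'
    · subst hc
      unfold altComp pvComp
      rw [if_pos (by rw [PySem.Chars.startswith_iff]; exact ⟨cs, rfl⟩),
        if_pos (pvIsNeg_bang cs), pvStrip_bang]
      simp [PySem.List.slice]
    · unfold altComp pvComp
      have h1 : PySem.Chars.startswith (c :: cs) ['!'] = false := by
        rw [Bool.eq_false_iff]
        intro h
        rcases (PySem.Chars.startswith_iff _ _).mp h with ⟨s, hs⟩
        rw [List.cons_append, List.nil_append] at hs
        exact hc (by injection hs with h1 _; exact h1.symm)
      have h2 : isNegTok (c :: cs) = false := by simp [isNegTok, hc]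
      rw [if_neg (by simp [h1]), if_neg (by simp [h2])]

-- ===== VERDICT (by name: the statement is the Claim_ definition above) =====
theorem pvMain (vi : List Int) (others : List (List Int)) (t : String) (hne : others ≠ []) :
    is_important vi others t = is_important_alt vi others t := by
  unfold is_important is_important_alt
  rw [if_neg (fun h => hne (List.length_eq_zero_iff.mp h)), if_neg hne]
  simp only []
  set bad : List Char := if t = "dis" then ['0'] else ['1'] with hbad_def
  have hbad : bad = ['0'] ∨ bad = ['1'] := by
    rw [hbad_def]; split
    · exact Or.inl rfl
    · exact Or.inr rfl
  rw [List.map_map]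
  simp only [Function.comp_def, pvFormula_eq]
  set m : List (List Char) := List.foldl
      (fun m f =>
        if List.count bad f = 0 ∧ List.length ((PySem.Set.ofList f).diff [['0'], ['1']]) ≠ 0 then
          m ++ (PySem.Set.ofList f).diff [['0'], ['1']]
        else m)
      [] (others.map (fun x => pvT (PySem.List.enumerate (vi.zip x) 0))) with hm
  have hmemm : ∀ tk, tk ∈ m ↔ pvGood vi others bad tk := by
    intro tk
    rw [hm, pvMinimize_mem]
    constructor
    · rintro ⟨f, hf, hcond, htk⟩
      rcases List.mem_map.mp hf with ⟨x, hx, rfl⟩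
      exact ⟨x, hx, (pvCond_iff bad _).mp hcond, (pvDmem_iff _ _).mp htk⟩
    · rintro ⟨x, hx, hcond, htk⟩
      exact ⟨pvT (PySem.List.enumerate (vi.zip x) 0), List.mem_map_of_mem hx,
        (pvCond_iff bad _).mpr hcond, (pvDmem_iff _ _).mpr htk⟩
  have hokm : ∀ tk ∈ m, okTok tk := by
    intro tk htk
    rcases (hmemm tk).mp htk with ⟨x, _, _, hv⟩
    exact pvOk_of_mem_pvT _ _ (List.mem_of_mem_filter hv)
  rw [pvCancel m m hokm]
  set L : PySem.Set (List Char) := List.foldl _ PySem.Set.empty others with hL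
  have hmemL : ∀ tk, tk ∈ L ↔ pvGood vi others bad tk := by
    intro tk
    rw [hL, pvLits_mem vi bad hbad others tk PySem.Set.empty]
    simp [PySem.Set.empty]
  rw [Bool.eq_iff_iff]
  rw [decide_eq_true_eq, List.any_eq_true]
  constructor
  · intro h
    have h1 : (m.filter fun a => decide ¬(stripTok a ∈ m ∧ '!' :: stripTok a ∈ m)) ≠ [] := by
      intro hh; rw [hh] at h; simp at h
    rcases List.exists_mem_of_ne_nil _ h1 with ⟨a, ha⟩
    rcases List.mem_filter.mp ha with ⟨ham, hq⟩
    rw [decide_eq_true_eq] at hq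
    have hcomp : pvComp a ∉ m := (pvSurv_iff m a ham).mp hq
    refine ⟨a, (hmemL a).mpr ((hmemm a).mp ham), ?_⟩
    rw [pvAltComp_eq]
    rw [Bool.not_eq_true', ← Bool.not_eq_true, PySem.Set.contains_iff]
    intro hcl
    exact hcomp ((hmemm _).mpr ((hmemL _).mp hcl))
  · rintro ⟨a, haL, hnc⟩
    have ham : a ∈ m := (hmemm a).mpr ((hmemL a).mp haL)
    rw [pvAltComp_eq, Bool.not_eq_true', ← Bool.not_eq_true, PySem.Set.contains_iff] at hnc
    have hcomp : pvComp a ∉ m := fun hcm => hnc ((hmemL _).mpr ((hmemm _).mp hcm))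
    have hq : ¬(stripTok a ∈ m ∧ '!' :: stripTok a ∈ m) := (pvSurv_iff m a ham).mpr hcomp
    have : a ∈ m.filter fun b => decide ¬(stripTok b ∈ m ∧ '!' :: stripTok b ∈ m) :=
      List.mem_filter.mpr ⟨ham, decide_eq_true hq⟩
    exact List.length_pos_of_mem this |>.ne'

theorem is_important_spec : Claim_equal_is_important := by
  intro vi others t _
  unfold Spec_is_important
  by_cases hne : others = []
  · subst hne
    rfl
  · exact pvMain vi others t hne
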